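-- pv_equiv track=rewrite | github.com/4maury/WTTJTestQa | Exercice1/usefulFunctions.py | fillTotals
-- ===== SOURCE A (Python) =====
-- def fillTotals(finalTab):
--     """Count and fill every total of the final tab."""
--
--     # 2nd line
--     for j in range(2, len(finalTab[0])): # For each total of the 2nd line
--         for i in range(2, len(finalTab)): # For all the column
--             finalTab[1][j]+=finalTab[i][j] # Increment the total
--
--     # 2nd column
--     for i in range(2, len(finalTab)): # For each total of the 2nd column
--         for j in range(2, len(finalTab[0])): # For all the lines
--             finalTab[i][1]+=finalTab[i][j] # Increment the total
--
--     # Global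
--     total = 0
--     for i in range(2, len(finalTab)):
--         total+=finalTab[i][1]
--     finalTab[1][1]=total
--
--     return finalTab
-- ===== SOURCE B (Python) =====
-- def fillTotals(finalTab):
--     """Count and fill every total of the final tab (single fused pass)."""
--     ncols = len(finalTab[0])
--     for i in range(2, len(finalTab)):
--         for j in range(2, ncols):
--             v = finalTab[i][j]
--             finalTab[1][j] += v
--             finalTab[i][1] += v
--     finalTab[1][1] = sum(finalTab[i][1] for i in range(2, len(finalTab)))
--     return finalTab
-- ===== Notes on version B (the rewrite author's own statement) =====
-- stated objective: simpler
-- what changed: A's two separate double loops (one filling the column totals, one the row totals) and the explicit global accumulator loop are replaced by a single fused pass that adds each data cell to both its column total and its row total, followed by one sum() for the global total.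
import Mathlib
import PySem

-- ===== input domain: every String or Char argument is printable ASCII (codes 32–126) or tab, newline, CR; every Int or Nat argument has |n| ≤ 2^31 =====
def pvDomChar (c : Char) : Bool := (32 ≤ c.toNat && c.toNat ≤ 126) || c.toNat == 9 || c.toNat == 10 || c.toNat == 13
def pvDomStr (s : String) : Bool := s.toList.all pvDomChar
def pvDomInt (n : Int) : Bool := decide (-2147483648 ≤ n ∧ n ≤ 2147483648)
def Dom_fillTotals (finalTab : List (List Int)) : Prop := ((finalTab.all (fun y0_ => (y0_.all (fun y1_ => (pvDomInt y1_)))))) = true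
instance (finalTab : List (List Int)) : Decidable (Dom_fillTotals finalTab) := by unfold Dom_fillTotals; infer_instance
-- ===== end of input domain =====

-- B fuses A's two double loops (column totals, then row totals) into one pass that feeds both
-- totals per cell, then fills the global total with a single sum; same cost, plainer shape.
-- Both Pythons mutate finalTab in place identically (they write the same cells); the theorems
-- below are about the returned value.

-- shared cell accessors (Python t[i][j] on in-range indices; Pre_ guarantees in-range)
def pvGet2 (t : List (List Int)) (i j : Nat) : Int := (t.getD i []).getD j 0
def pvMod2 (t : List (List Int)) (i j : Nat) (f : Int → Int) : List (List Int) :=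
  t.modify i (fun r => r.modify j f)
def pvSet2 (t : List (List Int)) (i j : Nat) (v : Int) : List (List Int) :=
  pvMod2 t i j (fun _ => v)

-- ===== PORT A =====
def fillTotals (finalTab : List (List Int)) : List (List Int) :=
  -- 2nd line: for j in range(2, len(finalTab[0])): for i in range(2, len(finalTab)): finalTab[1][j] += finalTab[i][j]
  let t1 := (List.range' 2 ((finalTab.headD []).length - 2)).foldl
    (fun t j => (List.range' 2 (finalTab.length - 2)).foldl
      (fun t i => pvMod2 t 1 j (· + pvGet2 t i j)) t) finalTab
  -- 2nd column: for i: for j: finalTab[i][1] += finalTab[i][j]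
  let t2 := (List.range' 2 (finalTab.length - 2)).foldl
    (fun t i => (List.range' 2 ((finalTab.headD []).length - 2)).foldl
      (fun t j => pvMod2 t i 1 (· + pvGet2 t i j)) t) t1
  -- global
  let total := (List.range' 2 (finalTab.length - 2)).foldl (fun s i => s + pvGet2 t2 i 1) 0
  pvSet2 t2 1 1 total

-- ===== PORT B =====
def fillTotals_alt (finalTab : List (List Int)) : List (List Int) :=
  let ncols := (finalTab.headD []).length
  -- fused pass: v = finalTab[i][j]; finalTab[1][j] += v; finalTab[i][1] += v
  let t1 := (List.range' 2 (finalTab.length - 2)).foldl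
    (fun t i => (List.range' 2 (ncols - 2)).foldl
      (fun t j => let v := pvGet2 t i j; pvMod2 (pvMod2 t 1 j (· + v)) i 1 (· + v)) t) finalTab
  let total := (List.range' 2 (t1.length - 2)).foldl (fun s i => s + pvGet2 t1 i 1) 0
  pvSet2 t1 1 1 total

-- ===== PRECONDITION & SPEC =====
-- Exactly the inputs on which the Python A returns (otherwise it raises IndexError):
-- at least 2 rows, row 1 has at least 2 cells, every row from index 2 on has at least 2 cells,
-- and when len(row 0) > 2 rows 1,2,… must be at least that long (the loops index up to it).
def Pre_fillTotals (finalTab : List (List Int)) : Prop :=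
  2 ≤ finalTab.length ∧ 2 ≤ (finalTab.getD 1 []).length ∧
  (∀ i ∈ List.range' 2 (finalTab.length - 2),
      2 ≤ (finalTab.getD i []).length ∧
      (2 < (finalTab.getD 0 []).length →
        (finalTab.getD 0 []).length ≤ (finalTab.getD i []).length)) ∧
  (2 < finalTab.length → 2 < (finalTab.getD 0 []).length →
      (finalTab.getD 0 []).length ≤ (finalTab.getD 1 []).length)
instance (finalTab : List (List Int)) : Decidable (Pre_fillTotals finalTab) := by
  unfold Pre_fillTotals; infer_instance

def pvWitness_fillTotals : List (List Int) := [[7, 0, 3], [0, 0, 0], [1, 0, 4]]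

def Spec_fillTotals (finalTab : List (List Int)) (out : List (List Int)) : Prop := out = fillTotals_alt finalTab
instance (finalTab : List (List Int)) (out : List (List Int)) : Decidable (Spec_fillTotals finalTab out) := by unfold Spec_fillTotals; infer_instance

-- ===== CLAIM (what is proved, stated in full; the proofs are below) =====
def Claim_equal_fillTotals : Prop := ∀ (finalTab : List (List Int)), Dom_fillTotals finalTab → Pre_fillTotals finalTab → Spec_fillTotals finalTab (fillTotals finalTab)

-- ===== LEMMAS AND PROOFS =====

-- every write either algorithm performs is an addition into one cell
def pvAdd (t : List (List Int)) (u : Nat × Nat × Int) : List (List Int) :=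
  pvMod2 t u.1 u.2.1 (· + u.2.2)

lemma rowAdd_comm (r : List Int) (b b' : Nat) (v v' : Int) :
    (r.modify b (· + v)).modify b' (· + v') = (r.modify b' (· + v')).modify b (· + v) := by
  apply List.ext_getElem?
  intro k
  simp only [List.getElem?_modify, Option.map_eq_map]
  cases r[k]? with
  | none => rfl
  | some x =>
    simp only [Option.map_some, Option.some.injEq]
    split_ifs <;> omega

-- additions into cells commute (different cells are independent; equal cells: + is commutative)
lemma pvAdd_comm (t : List (List Int)) (u u' : Nat × Nat × Int) :
    pvAdd (pvAdd t u) u' = pvAdd (pvAdd t u') u := by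
  obtain ⟨a, b, v⟩ := u
  obtain ⟨a', b', v'⟩ := u'
  unfold pvAdd pvMod2
  apply List.ext_getElem?
  intro k
  simp only [List.getElem?_modify, Option.map_eq_map]
  cases t[k]? with
  | none => rfl
  | some r =>
    by_cases h1 : a = k <;> by_cases h2 : a' = k <;> simp [h1, h2, rowAdd_comm]

lemma pvGet2_pvMod2_ne (t : List (List Int)) (a b i j : Nat) (f : Int → Int)
    (h : a ≠ i ∨ b ≠ j) : pvGet2 (pvMod2 t a b f) i j = pvGet2 t i j := by
  unfold pvGet2 pvMod2
  simp only [List.getD_eq_getElem?_getD, List.getElem?_modify]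
  by_cases ha : a = i
  · subst ha
    have hb : b ≠ j := h.resolve_left (by simp)
    cases t[a]? with
    | none => rfl
    | some r => simp [hb]
  · simp [ha]

lemma length_pvAdd (t : List (List Int)) (u : Nat × Nat × Int) :
    (pvAdd t u).length = t.length := by
  unfold pvAdd pvMod2; simp

lemma length_foldl_pvAdd (l : List (Nat × Nat × Int)) (t : List (List Int)) :
    (l.foldl pvAdd t).length = t.length := by
  induction l generalizing t with
  | nil => rfl
  | cons u l ih => simp [List.foldl_cons, ih, length_pvAdd]

-- the region both algorithms only READ (rows ≥ 2, columns ≥ 2) is never written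
def Agrees (t0 t : List (List Int)) : Prop :=
  ∀ i j, 2 ≤ i → 2 ≤ j → pvGet2 t i j = pvGet2 t0 i j

-- generic: replace a fold's step by a pure step, given an invariant
lemma foldl_switch {α β : Type} (P : β → Prop) (s s' : β → α → β) :
    ∀ (l : List α) (t : β),
      (∀ t x, x ∈ l → P t → s t x = s' t x ∧ P (s t x)) → P t →
      l.foldl s t = l.foldl s' t ∧ P (l.foldl s t) := by
  intro l
  induction l with
  | nil => exact fun t _ hP => ⟨rfl, hP⟩
  | cons x xs ih =>
    intro t h hP
    obtain ⟨he, hPs⟩ := h t x (List.mem_cons_self) hP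
    have := ih (s t x) (fun t y hy hPt => h t y (List.mem_cons_of_mem _ hy) hPt) hPs
    simp only [List.foldl_cons]
    exact ⟨this.1.trans (by rw [he]), this.2⟩

lemma foldl_perm {α β : Type} (f : β → α → β)
    (comm : ∀ b x y, f (f b x) y = f (f b y) x) {l1 l2 : List α} (h : l1.Perm l2) :
    ∀ b, l1.foldl f b = l2.foldl f b := by
  induction h with
  | nil => intro b; rfl
  | cons x _ ih => intro b; simp only [List.foldl_cons]; exact ih _
  | swap x y l => intro b; simp only [List.foldl_cons]; rw [comm]
  | trans _ _ ih1 ih2 => intro b; rw [ih1 b, ih2 b]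

-- A, phase 1 (column totals), with reads frozen at t0
lemma phase1_eq (t0 : List (List Int)) (rows cols : List Nat)
    (hr : ∀ i ∈ rows, 2 ≤ i) (hc : ∀ j ∈ cols, 2 ≤ j) (t : List (List Int)) (hA : Agrees t0 t) :
    cols.foldl (fun t j => rows.foldl (fun t i => pvMod2 t 1 j (· + pvGet2 t i j)) t) t
      = (cols.flatMap (fun j => rows.map (fun i => ((1 : Nat), j, pvGet2 t0 i j)))).foldl pvAdd t
    ∧ Agrees t0 (cols.foldl (fun t j => rows.foldl (fun t i => pvMod2 t 1 j (· + pvGet2 t i j)) t) t) := by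
  rw [List.foldl_flatMap]
  refine foldl_switch (Agrees t0) _ _ cols t (fun t j hj hAt => ?_) hA
  have inner := foldl_switch (Agrees t0)
    (fun t i => pvMod2 t 1 j (· + pvGet2 t i j))
    (fun t i => pvAdd t (1, j, pvGet2 t0 i j)) rows t
    (fun t i hi hAt' => by
      constructor
      · show pvMod2 t 1 j (· + pvGet2 t i j) = pvMod2 t 1 j (· + pvGet2 t0 i j)
        rw [hAt' i j (hr i hi) (hc j hj)]
      · show Agrees t0 (pvMod2 t 1 j (· + pvGet2 t i j))
        intro i' j' hi' hj'
        rw [pvGet2_pvMod2_ne t 1 j i' j' _ (by omega)]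
        exact hAt' i' j' hi' hj') hAt
  rw [List.foldl_map]
  exact inner

-- A, phase 2 (row totals), with reads frozen at t0
lemma phase2_eq (t0 : List (List Int)) (rows cols : List Nat)
    (hr : ∀ i ∈ rows, 2 ≤ i) (hc : ∀ j ∈ cols, 2 ≤ j) (t : List (List Int)) (hA : Agrees t0 t) :
    rows.foldl (fun t i => cols.foldl (fun t j => pvMod2 t i 1 (· + pvGet2 t i j)) t) t
      = (rows.flatMap (fun i => cols.map (fun j => (i, (1 : Nat), pvGet2 t0 i j)))).foldl pvAdd t
    ∧ Agrees t0 (rows.foldl (fun t i => cols.foldl (fun t j => pvMod2 t i 1 (· + pvGet2 t i j)) t) t) := by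
  rw [List.foldl_flatMap]
  refine foldl_switch (Agrees t0) _ _ rows t (fun t i hi hAt => ?_) hA
  have inner := foldl_switch (Agrees t0)
    (fun t j => pvMod2 t i 1 (· + pvGet2 t i j))
    (fun t j => pvAdd t (i, 1, pvGet2 t0 i j)) cols t
    (fun t j hj hAt' => by
      constructor
      · show pvMod2 t i 1 (· + pvGet2 t i j) = pvMod2 t i 1 (· + pvGet2 t0 i j)
        rw [hAt' i j (hr i hi) (hc j hj)]
      · show Agrees t0 (pvMod2 t i 1 (· + pvGet2 t i j))
        intro i' j' hi' hj'
        rw [pvGet2_pvMod2_ne t i 1 i' j' _ (by omega)]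
        exact hAt' i' j' hi' hj') hAt
  rw [List.foldl_map]
  exact inner

-- B, fused pass, with reads frozen at t0
lemma phaseB_eq (t0 : List (List Int)) (rows cols : List Nat)
    (hr : ∀ i ∈ rows, 2 ≤ i) (hc : ∀ j ∈ cols, 2 ≤ j) (t : List (List Int)) (hA : Agrees t0 t) :
    rows.foldl (fun t i => cols.foldl
        (fun t j => let v := pvGet2 t i j; pvMod2 (pvMod2 t 1 j (· + v)) i 1 (· + v)) t) t
      = (rows.flatMap (fun i => cols.flatMap
          (fun j => [((1 : Nat), j, pvGet2 t0 i j), (i, (1 : Nat), pvGet2 t0 i j)]))).foldl pvAdd t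
    ∧ Agrees t0 (rows.foldl (fun t i => cols.foldl
        (fun t j => let v := pvGet2 t i j; pvMod2 (pvMod2 t 1 j (· + v)) i 1 (· + v)) t) t) := by
  rw [List.foldl_flatMap]
  refine foldl_switch (Agrees t0) _ _ rows t (fun t i hi hAt => ?_) hA
  have inner := foldl_switch (Agrees t0)
    (fun t j => let v := pvGet2 t i j; pvMod2 (pvMod2 t 1 j (· + v)) i 1 (· + v))
    (fun t j => pvAdd (pvAdd t (1, j, pvGet2 t0 i j)) (i, 1, pvGet2 t0 i j)) cols t
    (fun t j hj hAt' => by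
      have hg : pvGet2 t i j = pvGet2 t0 i j := hAt' i j (hr i hi) (hc j hj)
      constructor
      · show pvMod2 (pvMod2 t 1 j (· + pvGet2 t i j)) i 1 (· + pvGet2 t i j)
            = pvMod2 (pvMod2 t 1 j (· + pvGet2 t0 i j)) i 1 (· + pvGet2 t0 i j)
        rw [hg]
      · show Agrees t0 (pvMod2 (pvMod2 t 1 j (· + pvGet2 t i j)) i 1 (· + pvGet2 t i j))
        intro i' j' hi' hj'
        rw [pvGet2_pvMod2_ne _ i 1 i' j' _ (by omega),
            pvGet2_pvMod2_ne t 1 j i' j' _ (by omega)]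
        exact hAt' i' j' hi' hj') hAt
  refine ⟨inner.1.trans ?_, inner.2⟩
  rw [List.foldl_flatMap]
  simp only [List.foldl_cons, List.foldl_nil]

-- permutation bookkeeping
lemma perm_middle_swap {β : Type} (x y z : List β) : (x ++ (y ++ z)).Perm (y ++ (x ++ z)) := by
  have h := List.Perm.append_right z (List.perm_append_comm (l₁ := x) (l₂ := y))
  simpa [List.append_assoc] using h

lemma perm_flatMap_cons {α β : Type} (l : List α) (f : α → β) (g : α → List β) :
    (l.flatMap (fun x => f x :: g x)).Perm (l.map f ++ l.flatMap g) := by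
  induction l with
  | nil => simp
  | cons a l ih =>
    simp only [List.flatMap_cons, List.map_cons, List.cons_append]
    refine List.Perm.cons _ ?_
    exact (List.Perm.append_left (g a) ih).trans
      (perm_middle_swap (g a) (l.map f) (l.flatMap g))

lemma perm_flatMap_append {α β : Type} (l : List α) (f g : α → List β) :
    (l.flatMap (fun x => f x ++ g x)).Perm (l.flatMap f ++ l.flatMap g) := by
  induction l with
  | nil => simp
  | cons a l ih =>
    simp only [List.flatMap_cons]
    have h1 : ((f a ++ g a) ++ l.flatMap (fun x => f x ++ g x)).Perm
        ((f a ++ g a) ++ (l.flatMap f ++ l.flatMap g)) := List.Perm.append_left _ ih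
    have h2 : (f a ++ (g a ++ (l.flatMap f ++ l.flatMap g))).Perm
        (f a ++ (l.flatMap f ++ (g a ++ l.flatMap g))) :=
      List.Perm.append_left (f a) (perm_middle_swap (g a) (l.flatMap f) (l.flatMap g))
    have h2' : ((f a ++ g a) ++ (l.flatMap f ++ l.flatMap g)).Perm
        ((f a ++ l.flatMap f) ++ (g a ++ l.flatMap g)) := by
      simpa [List.append_assoc] using h2
    exact h1.trans h2'

lemma perm_flatMap_congr {α β : Type} (l : List α) (f g : α → List β)
    (h : ∀ x ∈ l, (f x).Perm (g x)) : (l.flatMap f).Perm (l.flatMap g) := by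
  induction l with
  | nil => simp
  | cons a l ih =>
    simp only [List.flatMap_cons]
    exact (h a (List.mem_cons_self)).append (ih (fun x hx => h x (List.mem_cons_of_mem _ hx)))

lemma perm_flatMap_swap {α γ β : Type} (l1 : List α) (l2 : List γ) (f : α → γ → β) :
    (l1.flatMap (fun a => l2.map (f a))).Perm (l2.flatMap (fun c => l1.map (fun a => f a c))) := by
  induction l1 with
  | nil => simp
  | cons a l1 ih =>
    simp only [List.flatMap_cons, List.map_cons]
    refine List.Perm.trans (List.Perm.append_left _ ih) ?_
    exact (perm_flatMap_cons l2 (f a) (fun c => l1.map (fun a => f a c))).symm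

-- B's update list is a permutation of A's
lemma perm_upds (t0 : List (List Int)) (rows cols : List Nat) :
    (rows.flatMap (fun i => cols.flatMap
        (fun j => [((1 : Nat), j, pvGet2 t0 i j), (i, (1 : Nat), pvGet2 t0 i j)]))).Perm
    ((cols.flatMap (fun j => rows.map (fun i => ((1 : Nat), j, pvGet2 t0 i j)))) ++
     (rows.flatMap (fun i => cols.map (fun j => (i, (1 : Nat), pvGet2 t0 i j))))) := by
  have step1 : ∀ i ∈ rows,
      (cols.flatMap (fun j => [((1 : Nat), j, pvGet2 t0 i j), (i, (1 : Nat), pvGet2 t0 i j)])).Perm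
      (cols.map (fun j => ((1 : Nat), j, pvGet2 t0 i j)) ++
       cols.map (fun j => (i, (1 : Nat), pvGet2 t0 i j))) := by
    intro i _
    have h := perm_flatMap_cons cols (fun j => ((1 : Nat), j, pvGet2 t0 i j))
      (fun j => [(i, (1 : Nat), pvGet2 t0 i j)])
    have hm : cols.flatMap (fun j => [(i, (1 : Nat), pvGet2 t0 i j)])
        = cols.map (fun j => (i, (1 : Nat), pvGet2 t0 i j)) := by
      rw [← List.flatMap_singleton' (cols.map (fun j => (i, (1 : Nat), pvGet2 t0 i j))),
          List.flatMap_map]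
    rw [hm] at h
    exact h
  refine ((perm_flatMap_congr _ _ _ step1).trans (perm_flatMap_append _ _ _)).trans ?_
  exact List.Perm.append_right _
    (perm_flatMap_swap rows cols (fun i j => ((1 : Nat), j, pvGet2 t0 i j)))

lemma mem_range'_two_le {n k : Nat} (h : k ∈ List.range' 2 n) : 2 ≤ k :=
  (List.mem_range'_1.mp h).1

theorem fillTotals_eq_alt (t : List (List Int)) : fillTotals t = fillTotals_alt t := by
  unfold fillTotals fillTotals_alt
  have hAgrees0 : Agrees t t := fun _ _ _ _ => rfl
  set rows := List.range' 2 (t.length - 2) with hrows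
  set cols := List.range' 2 ((t.headD []).length - 2) with hcols
  have hr : ∀ i ∈ rows, 2 ≤ i := fun i hi => mem_range'_two_le hi
  have hc : ∀ j ∈ cols, 2 ≤ j := fun j hj => mem_range'_two_le hj
  have h1 := phase1_eq t rows cols hr hc t hAgrees0
  have h2 := phase2_eq t rows cols hr hc _ h1.2
  have hB := phaseB_eq t rows cols hr hc t hAgrees0
  have hfold := foldl_perm pvAdd (fun b x y => pvAdd_comm b x y) (perm_upds t rows cols) t
  have htab : (cols.foldl (fun t j => rows.foldl (fun t i => pvMod2 t 1 j (· + pvGet2 t i j)) t) t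
        |> rows.foldl (fun t i => cols.foldl (fun t j => pvMod2 t i 1 (· + pvGet2 t i j)) t))
      = rows.foldl (fun t i => cols.foldl
          (fun t j => let v := pvGet2 t i j; pvMod2 (pvMod2 t 1 j (· + v)) i 1 (· + v)) t) t := by
    rw [h2.1, h1.1, ← List.foldl_append, hB.1, hfold]
  have hlen : (rows.foldl (fun t i => cols.foldl
        (fun t j => let v := pvGet2 t i j; pvMod2 (pvMod2 t 1 j (· + v)) i 1 (· + v)) t) t).length
      = t.length := by
    rw [hB.1, length_foldl_pvAdd]
  simp only []
  rw [htab, hlen]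

-- ===== VERDICT (by name: the statement is the Claim_ definition above) =====
theorem fillTotals_spec : Claim_equal_fillTotals := by
  intro t _ _
  show fillTotals t = fillTotals_alt t
  exact fillTotals_eq_alt t
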